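-- pv_equiv track=rewrite | github.com/rlamacraft/ArmCaptiveDecoder | decoder.py | _remove_repeated_none_and_leading_none
-- ===== SOURCE A (Python) =====
-- def _remove_repeated_none_and_leading_none(elements):
--     no_repeat_none = []
--     for elem in elements:
--         if not elem == None:
--             no_repeat_none.append(elem)
--         else:
--             if no_repeat_none != [] and no_repeat_none[-1] != None:
--                 no_repeat_none.append(None)
--     return(no_repeat_none)
-- ===== SOURCE B (Python) =====
-- def _remove_repeated_none_and_leading_none(elements):
--     # keep x exactly when x is non-None, or its predecessor exists and is non-None
--     prevs = [None] + elements[:-1]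
--     return [x for p, x in zip(prevs, elements) if x != None or p != None]
-- ===== Notes on version B (the rewrite author's own statement) =====
-- stated objective: simpler
-- what changed: B replaces A's stateful loop that inspects the output list's last element with a stateless pairwise filter: zip the sequence with its shifted self and keep an element iff it is non-None or its predecessor is non-None.
import Mathlib
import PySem

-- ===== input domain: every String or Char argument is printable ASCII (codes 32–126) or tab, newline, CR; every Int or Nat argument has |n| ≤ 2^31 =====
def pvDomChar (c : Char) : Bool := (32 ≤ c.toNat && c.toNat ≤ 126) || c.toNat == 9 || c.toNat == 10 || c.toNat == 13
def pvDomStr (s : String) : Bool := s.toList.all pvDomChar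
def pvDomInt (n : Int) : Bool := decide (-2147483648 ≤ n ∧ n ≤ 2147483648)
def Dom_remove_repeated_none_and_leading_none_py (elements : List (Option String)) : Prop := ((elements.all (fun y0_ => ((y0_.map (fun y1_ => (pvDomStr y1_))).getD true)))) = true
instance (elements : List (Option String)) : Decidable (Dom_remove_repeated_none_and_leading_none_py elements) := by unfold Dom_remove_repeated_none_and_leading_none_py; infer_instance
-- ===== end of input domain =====

-- B replaces A's stateful loop (inspecting the output's last element) with a stateless pairwise filter over the list zipped with its shifted self; same O(n) cost, simpler decomposition.
-- ===== PORT A =====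
def remove_repeated_none_and_leading_none_py (elements : List (Option String)) : List (Option String) :=
  elements.foldl (fun no_repeat_none elem =>
    if elem ≠ none then no_repeat_none ++ [elem]
    else if no_repeat_none ≠ [] ∧ no_repeat_none.getLast? ≠ some none then no_repeat_none ++ [none]
    else no_repeat_none) []

-- ===== PORT B =====
def remove_repeated_none_and_leading_none_py_alt (elements : List (Option String)) : List (Option String) :=
  ((none :: elements.dropLast).zip elements).filterMap
    (fun px => if px.2 ≠ none ∨ px.1 ≠ none then some px.2 else none)

-- ===== PRECONDITION & SPEC =====
def Spec_remove_repeated_none_and_leading_none_py (elements : List (Option String)) (out : List (Option String)) : Prop := out = remove_repeated_none_and_leading_none_py_alt elements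
instance (elements : List (Option String)) (out : List (Option String)) : Decidable (Spec_remove_repeated_none_and_leading_none_py elements out) := by unfold Spec_remove_repeated_none_and_leading_none_py; infer_instance

-- ===== CLAIM (what is proved, stated in full; the proofs are below) =====
def Claim_equal_remove_repeated_none_and_leading_none_py : Prop := ∀ (elements : List (Option String)), Dom_remove_repeated_none_and_leading_none_py elements → Spec_remove_repeated_none_and_leading_none_py elements (remove_repeated_none_and_leading_none_py elements)

-- ===== LEMMAS AND PROOFS =====

-- ===== VERDICT (by name: the statement is the Claim_ definition above) =====
-- B's pairwise filter, written as structural recursion carrying the previous element.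
def pvKeep (prev : Option String) : List (Option String) → List (Option String)
  | [] => []
  | x :: xs => if x ≠ none ∨ prev ≠ none then x :: pvKeep x xs else pvKeep x xs

theorem pvZip_eq_keep (prev : Option String) (xs : List (Option String)) :
    ((prev :: xs.dropLast).zip xs).filterMap
      (fun px => if px.2 ≠ none ∨ px.1 ≠ none then some px.2 else none) = pvKeep prev xs := by
  induction xs generalizing prev with
  | nil => rfl
  | cons y ys ih =>
    have h : (prev :: (y :: ys).dropLast).zip (y :: ys)
        = (prev, y) :: ((y :: ys.dropLast).zip ys) := by
      cases ys <;> simp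
    rw [h]
    simp only [List.filterMap_cons, pvKeep, ih]
    by_cases hk : y ≠ none ∨ prev ≠ none <;> simp [hk]

theorem pvFoldl_eq_keep (xs : List (Option String)) (acc : List (Option String))
    (prev : Option String)
    (hp : prev ≠ none ↔ acc ≠ [] ∧ acc.getLast? ≠ some none) :
    xs.foldl (fun no_repeat_none elem =>
      if elem ≠ none then no_repeat_none ++ [elem]
      else if no_repeat_none ≠ [] ∧ no_repeat_none.getLast? ≠ some none then no_repeat_none ++ [none]
      else no_repeat_none) acc = acc ++ pvKeep prev xs := by
  induction xs generalizing acc prev with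
  | nil => simp [pvKeep]
  | cons x xs ih =>
    by_cases hx : x = none
    · subst hx
      simp only [List.foldl_cons, pvKeep]
      rw [if_neg (by simp)]
      by_cases hc : acc ≠ [] ∧ acc.getLast? ≠ some none
      · have hprev : prev ≠ none := hp.mpr hc
        rw [if_pos hc, if_pos (Or.inr hprev),
          ih (acc ++ [none]) none (by simp [List.getLast?_append])]
        simp
      · have hprev : prev = none := by by_contra h; exact hc (hp.mp h)
        rw [if_neg hc, if_neg (by simp [hprev]),
          ih acc none ⟨fun h => absurd rfl h, fun h => absurd hprev (hp.mpr h)⟩]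
    · have hacc : (acc ++ [x]) ≠ [] ∧ (acc ++ [x]).getLast? ≠ some none := by
        constructor
        · simp
        · simp [List.getLast?_append, hx]
      have := ih (acc ++ [x]) x (by simp [hx, hacc])
      simp only [List.foldl_cons, if_pos hx, this, pvKeep, if_pos (Or.inl hx),
        List.append_assoc, List.cons_append, List.nil_append]

theorem remove_repeated_none_and_leading_none_py_spec : Claim_equal_remove_repeated_none_and_leading_none_py := by
  intro elements _
  unfold Spec_remove_repeated_none_and_leading_none_py
  unfold remove_repeated_none_and_leading_none_py remove_repeated_none_and_leading_none_py_alt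
  rw [pvZip_eq_keep, pvFoldl_eq_keep elements [] none (by simp)]
  rfl
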